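-- pv_equiv track=rewrite | github.com/wep0504/embed-ai-tool | scripts/validate_repo.py | build_patch_suggestions
-- ===== SOURCE A (Python) =====
-- def parse_strict_issue(issue: str) -> tuple[str, str]:
--     issue_main = issue.split("| fix:", 1)[0].strip()
--     for marker in (" missing strict content: ", " missing strict type keywords in "):
--         parts = issue_main.split(marker, 1)
--         if len(parts) == 2:
--             skill_path = parts[0].strip()
--             rule_key = parts[1].strip()
--             return skill_path, rule_key
--     return "unknown", issue_main
--
-- def render_suggestion(rule_key: str) -> list[str]:
--     if rule_key == "显式输入 > 工作区线索 > 历史上下文 > 默认值":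
--         return [
--             "## 自动探测",
--             "- 统一优先级：`显式输入 > 工作区线索 > 历史上下文 > 默认值`。",
--         ]
--     if rule_key == "ambiguous-context":
--         return [
--             "## 自动探测",
--             "- 若多个候选同样合理且选择错误会破坏流程，标记为 `ambiguous-context` 并停止猜测。",
--         ]
--     return [f"- 请补齐严格规则内容：{rule_key}"]
--
-- def build_patch_suggestions(strict_issues: list[str]) -> dict[str, list[str]]:
--     by_skill_rules: dict[str, set[str]] = {}
--     for issue in strict_issues:
--         skill_path, rule_key = parse_strict_issue(issue)
--         if skill_path == "unknown":
--             continue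
--         by_skill_rules.setdefault(skill_path, set()).add(rule_key)
--
--     suggestions: dict[str, list[str]] = {}
--     for skill_path in sorted(by_skill_rules):
--         lines: list[str] = []
--         for rule_key in sorted(by_skill_rules[skill_path]):
--             lines.extend(render_suggestion(rule_key))
--         suggestions[skill_path] = lines
--     return suggestions
-- ===== SOURCE B (Python) =====
-- def parse_strict_issue(issue: str) -> tuple[str, str]:
--     issue_main = issue.split("| fix:", 1)[0].strip()
--     for marker in (" missing strict content: ", " missing strict type keywords in "):
--         parts = issue_main.split(marker, 1)
--         if len(parts) == 2:
--             skill_path = parts[0].strip()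
--             rule_key = parts[1].strip()
--             return skill_path, rule_key
--     return "unknown", issue_main
--
-- def render_suggestion(rule_key: str) -> list[str]:
--     if rule_key == "显式输入 > 工作区线索 > 历史上下文 > 默认值":
--         return [
--             "## 自动探测",
--             "- 统一优先级：`显式输入 > 工作区线索 > 历史上下文 > 默认值`。",
--         ]
--     if rule_key == "ambiguous-context":
--         return [
--             "## 自动探测",
--             "- 若多个候选同样合理且选择错误会破坏流程，标记为 `ambiguous-context` 并停止猜测。",
--         ]
--     return [f"- 请补齐严格规则内容：{rule_key}"]
--
-- def build_patch_suggestions(strict_issues: list[str]) -> dict[str, list[str]]: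
--     pairs = [p for p in map(parse_strict_issue, strict_issues) if p[0] != "unknown"]
--     return {
--         skill: [line
--                 for rule in sorted({r for s, r in pairs if s == skill})
--                 for line in render_suggestion(rule)]
--         for skill in sorted({s for s, _ in pairs})
--     }
-- ===== Notes on version B (the rewrite author's own statement) =====
-- stated objective: alternative
-- what changed: B drops A's incrementally built dict-of-sets: it builds a flat filtered (skill, rule) pair list once and produces the result as a dict comprehension over the sorted distinct skills, rescanning the pair list per skill for its sorted distinct rule keys.
import Mathlib
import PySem

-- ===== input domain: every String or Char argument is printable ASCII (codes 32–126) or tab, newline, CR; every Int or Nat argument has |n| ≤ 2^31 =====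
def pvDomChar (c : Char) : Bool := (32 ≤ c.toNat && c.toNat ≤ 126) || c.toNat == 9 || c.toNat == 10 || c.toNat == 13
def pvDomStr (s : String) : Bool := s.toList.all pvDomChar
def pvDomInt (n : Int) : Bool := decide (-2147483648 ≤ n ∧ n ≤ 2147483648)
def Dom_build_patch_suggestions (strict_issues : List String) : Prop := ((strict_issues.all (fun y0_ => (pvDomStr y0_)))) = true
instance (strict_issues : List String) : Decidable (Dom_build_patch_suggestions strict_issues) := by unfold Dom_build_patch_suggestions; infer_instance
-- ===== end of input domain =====

-- B replaces A's incrementally built dict-of-sets by sorted set comprehensions with a per-skill rescan (objective: alternative decomposition, same observable result).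


-- ===== PORT A =====
-- shared module helper: parse_strict_issue (split with maxsplit=1 ported via PySem.Str.splitMax?; sep ≠ "" so the option is some)
def parse_strict_issue (issue : String) : String × String :=
  let issue_main := PySem.Str.strip ((((PySem.Str.splitMax? issue "| fix:" 1).getD []).headD ""))
  let p1 := (PySem.Str.splitMax? issue_main " missing strict content: " 1).getD []
  if p1.length = 2 then
    (PySem.Str.strip (p1.headD ""), PySem.Str.strip (p1.getD 1 ""))
  else
    let p2 := (PySem.Str.splitMax? issue_main " missing strict type keywords in " 1).getD []
    if p2.length = 2 then
      (PySem.Str.strip (p2.headD ""), PySem.Str.strip (p2.getD 1 ""))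
    else
      ("unknown", issue_main)

-- shared module helper: render_suggestion
def render_suggestion (rule_key : String) : List String :=
  if rule_key = "显式输入 > 工作区线索 > 历史上下文 > 默认值" then
    ["## 自动探测", "- 统一优先级：`显式输入 > 工作区线索 > 历史上下文 > 默认值`。"]
  else if rule_key = "ambiguous-context" then
    ["## 自动探测", "- 若多个候选同样合理且选择错误会破坏流程，标记为 `ambiguous-context` 并停止猜测。"]
  else
    ["- 请补齐严格规则内容：" ++ rule_key]

-- A: one pass building a dict of sets (setdefault(...).add(...) = Dict.modify with Set.add), then sorted keys / sorted rules
def build_patch_suggestions (strict_issues : List String) : List (String × List String) :=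
  let by_skill_rules : PySem.Dict String (PySem.Set String) :=
    strict_issues.foldl (fun d issue =>
      let pr := parse_strict_issue issue
      if pr.1 = "unknown" then d
      else d.modify pr.1 PySem.Set.empty (fun s => s.add pr.2)) PySem.Dict.empty
  let suggestions : PySem.Dict String (List String) :=
    (PySem.List.sorted by_skill_rules.keys (fun x => x) false).foldl (fun sg skill_path =>
      let lines := (PySem.List.sorted (by_skill_rules.getD skill_path PySem.Set.empty) (fun x => x) false).foldl
        (fun acc rule_key => acc ++ render_suggestion rule_key) []
      sg.insert skill_path lines) PySem.Dict.empty
  suggestions.items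

-- ===== PORT B =====
-- B: flat filtered pair list; dict comprehension over sorted distinct skills, per-skill rescan for sorted distinct rules
def build_patch_suggestions_alt (strict_issues : List String) : List (String × List String) :=
  let pairs := (strict_issues.map parse_strict_issue).filter (fun p => decide (p.1 ≠ "unknown"))
  ((PySem.List.sorted (PySem.Set.ofList (pairs.map (fun p => p.1))) (fun x => x) false).foldl
    (fun sg skill =>
      sg.insert skill
        ((PySem.List.sorted (PySem.Set.ofList ((pairs.filter (fun p => p.1 == skill)).map (fun p => p.2))) (fun x => x) false).flatMap
          render_suggestion))
    (PySem.Dict.empty : PySem.Dict String (List String))).items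

-- ===== PRECONDITION & SPEC =====
def Spec_build_patch_suggestions (strict_issues : List String) (out : List (String × List String)) : Prop := out = build_patch_suggestions_alt strict_issues
instance (strict_issues : List String) (out : List (String × List String)) : Decidable (Spec_build_patch_suggestions strict_issues out) := by unfold Spec_build_patch_suggestions; infer_instance

-- ===== CLAIM (what is proved, stated in full; the proofs are below) =====
def Claim_equal_build_patch_suggestions : Prop := ∀ (strict_issues : List String), Dom_build_patch_suggestions strict_issues → Spec_build_patch_suggestions strict_issues (build_patch_suggestions strict_issues)

-- ===== LEMMAS AND PROOFS =====

-- A's grouping fold, re-expressed over the filtered pair list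
theorem foldA_eq_gen (l : List String) (d : PySem.Dict String (PySem.Set String)) :
    l.foldl (fun d issue =>
      let pr := parse_strict_issue issue
      if pr.1 = "unknown" then d
      else d.modify pr.1 PySem.Set.empty (fun s => s.add pr.2)) d
    = ((l.map parse_strict_issue).filter (fun p => decide (p.1 ≠ "unknown"))).foldl
        (fun d pr => d.modify pr.1 PySem.Set.empty (fun s => s.add pr.2)) d := by
  induction l generalizing d with
  | nil => rfl
  | cons x rest ih =>
    simp only [List.foldl_cons, List.map_cons, List.filter_cons]
    by_cases h : (parse_strict_issue x).1 = "unknown" <;> simpa [h] using ih _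

theorem foldA_eq (strict_issues : List String) :
    strict_issues.foldl (fun d issue =>
      let pr := parse_strict_issue issue
      if pr.1 = "unknown" then d
      else d.modify pr.1 PySem.Set.empty (fun s => s.add pr.2)) PySem.Dict.empty
    = ((strict_issues.map parse_strict_issue).filter (fun p => decide (p.1 ≠ "unknown"))).foldl
        (fun d pr => d.modify pr.1 PySem.Set.empty (fun s => s.add pr.2)) PySem.Dict.empty :=
  foldA_eq_gen strict_issues PySem.Dict.empty

-- the per-key content of the dict of sets
theorem getD_fold_modify_add (P : List (String × String)) (d : PySem.Dict String (PySem.Set String)) (s : String) :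
    (P.foldl (fun d pr => d.modify pr.1 PySem.Set.empty (fun t => t.add pr.2)) d).getD s PySem.Set.empty
    = PySem.Set.update (d.getD s PySem.Set.empty) ((P.filter (fun p => p.1 == s)).map (fun p => p.2)) := by
  induction P generalizing d with
  | nil => simp [PySem.Set.update]
  | cons p rest ih =>
    simp only [List.foldl_cons, ih]
    by_cases h : p.1 = s
    · simp [h, PySem.Dict.getD_modify_self, PySem.Set.update]
    · have h' : (p.1 == s) = false := by simp [h]
      have h2 : ¬ s = p.1 := fun hs => h hs.symm
      simp [h', PySem.Dict.getD_modify, h2]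

theorem build_patch_suggestions_eq (strict_issues : List String) :
    build_patch_suggestions strict_issues = build_patch_suggestions_alt strict_issues := by
  unfold build_patch_suggestions build_patch_suggestions_alt
  simp only []
  rw [foldA_eq]
  set P := (strict_issues.map parse_strict_issue).filter (fun p => decide (p.1 ≠ "unknown")) with hP
  set D := P.foldl (fun d pr => d.modify pr.1 PySem.Set.empty (fun s => s.add pr.2)) PySem.Dict.empty with hD
  have hkeys : D.keys = PySem.Set.ofList (P.map (fun p => p.1)) := by
    rw [hD, PySem.Dict.keys_foldl_modify_key (key := fun p : String × String => p.1)]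
    simp [PySem.Dict.empty, PySem.Dict.keys, PySem.Set.update_nil_left]
  have hget : ∀ s, D.getD s PySem.Set.empty
      = PySem.Set.ofList ((P.filter (fun p => p.1 == s)).map (fun p => p.2)) := by
    intro s
    rw [hD, getD_fold_modify_add]
    simp [PySem.Set.update_nil_left, PySem.Set.empty, PySem.Dict.getD, PySem.Dict.get?, PySem.Dict.empty]
  rw [hkeys]
  congr 1
  apply PySem.List.foldl_congr_mem
  intro acc s _
  congr 1
  rw [hget s, PySem.List.foldl_append_eq_flatMap]
  simp

-- ===== VERDICT (by name: the statement is the Claim_ definition above) =====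
theorem build_patch_suggestions_spec : Claim_equal_build_patch_suggestions := by
  intro xs _
  unfold Spec_build_patch_suggestions
  exact build_patch_suggestions_eq xs
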